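-- pv_equiv track=rewrite | github.com/RHUDHRESH/Raptorflow | backend/agents/onboarding/question_agent.py | assess_profile_completeness
-- ===== SOURCE A (Python) =====
-- from typing import Dict, List, Optional, Any
--
-- def assess_profile_completeness(answers: List[Dict[str, str]], entity_type: str) -> Dict[str, bool]:
--     """
--     Assesses which sections of the profile are complete.
--
--     Args:
--         answers: List of answered questions
--         entity_type: Type of entity
--
--     Returns:
--         Dict mapping section names to completion status
--     """
--     answered_ids = {qa["question_id"] for qa in answers}
--
--     required_sections = {
--         "entity_type": "entity_type" in answered_ids,
--         "clarity_statement": any("clarity" in qid or "one-line" in qid for qid in answered_ids),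
--         "goals": any("goal" in qid for qid in answered_ids),
--         "channels": any("channel" in qid for qid in answered_ids),
--         "constraints": any("constraint" in qid or "budget" in qid for qid in answered_ids),
--         "personas": any("persona" in qid or "customer" in qid or "audience" in qid for qid in answered_ids),
--     }
--
--     # Entity-specific requirements
--     if entity_type == "business":
--         required_sections["business_details"] = any(
--             "industry" in qid or "company" in qid for qid in answered_ids
--         )
--     elif entity_type == "personal_brand":
--         required_sections["personal_brand_details"] = any(
--             "niche" in qid or "expertise" in qid for qid in answered_ids
--         )
--
--     return required_sections
-- ===== SOURCE B (Python) =====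
-- def assess_profile_completeness(answers, entity_type):
--     result = {
--         "entity_type": False,
--         "clarity_statement": False,
--         "goals": False,
--         "channels": False,
--         "constraints": False,
--         "personas": False,
--     }
--     extra_key = None
--     if entity_type == "business":
--         extra_key, extra_terms = "business_details", ("industry", "company")
--         result[extra_key] = False
--     elif entity_type == "personal_brand":
--         extra_key, extra_terms = "personal_brand_details", ("niche", "expertise")
--         result[extra_key] = False
--     for qa in answers:
--         qid = qa["question_id"]
--         if qid == "entity_type":
--             result["entity_type"] = True
--         if "clarity" in qid or "one-line" in qid:
--             result["clarity_statement"] = True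
--         if "goal" in qid:
--             result["goals"] = True
--         if "channel" in qid:
--             result["channels"] = True
--         if "constraint" in qid or "budget" in qid:
--             result["constraints"] = True
--         if "persona" in qid or "customer" in qid or "audience" in qid:
--             result["personas"] = True
--         if extra_key is not None and any(t in qid for t in extra_terms):
--             result[extra_key] = True
--     return result
-- ===== Notes on version B (the rewrite author's own statement) =====
-- stated objective: simpler
-- what changed: B drops A's intermediate set of answered ids and its seven separate any()-scans; it pre-seeds the result dict (including the entity-specific key) with False and sets the flags in one pass over the answers.
-- outside the precondition, e.g. on assess_profile_completeness([{}], 'business'): A raises KeyError, B raises KeyError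
import Mathlib
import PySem

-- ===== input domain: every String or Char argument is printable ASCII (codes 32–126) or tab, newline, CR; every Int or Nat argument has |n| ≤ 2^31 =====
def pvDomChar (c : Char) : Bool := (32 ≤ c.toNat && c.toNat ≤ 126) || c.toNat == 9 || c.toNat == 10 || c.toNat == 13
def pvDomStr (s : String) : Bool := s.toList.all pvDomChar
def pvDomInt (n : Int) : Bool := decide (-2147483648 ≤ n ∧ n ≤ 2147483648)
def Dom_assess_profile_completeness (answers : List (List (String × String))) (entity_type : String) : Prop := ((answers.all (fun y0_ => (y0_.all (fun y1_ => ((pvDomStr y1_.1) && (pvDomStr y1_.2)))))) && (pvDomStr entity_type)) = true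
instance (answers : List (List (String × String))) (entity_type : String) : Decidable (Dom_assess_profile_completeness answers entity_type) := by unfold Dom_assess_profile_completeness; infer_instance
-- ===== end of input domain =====

-- B replaces A's six any()-scans over a set comprehension by one pass over the answers
-- updating pre-seeded flags (objective: simpler single-pass decomposition).
-- qa["question_id"] : first-match lookup; Pre_ excludes dicts missing the key (KeyError in A and B).
def pvQid (qa : List (String × String)) : String :=
  ((PySem.Dict.mk qa).get? "question_id").getD ""

-- ===== PORT A =====
def assess_profile_completeness (answers : List (List (String × String))) (entity_type : String) : List (String × Bool) :=
  let answered_ids : PySem.Set String := PySem.Set.ofList (answers.map pvQid)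
  let d : PySem.Dict String Bool := PySem.Dict.empty
  let d := d.insert "entity_type" (PySem.Set.contains answered_ids "entity_type")
  let d := d.insert "clarity_statement" (answered_ids.any fun qid => PySem.Str.isIn "clarity" qid || PySem.Str.isIn "one-line" qid)
  let d := d.insert "goals" (answered_ids.any fun qid => PySem.Str.isIn "goal" qid)
  let d := d.insert "channels" (answered_ids.any fun qid => PySem.Str.isIn "channel" qid)
  let d := d.insert "constraints" (answered_ids.any fun qid => PySem.Str.isIn "constraint" qid || PySem.Str.isIn "budget" qid)
  let d := d.insert "personas" (answered_ids.any fun qid => PySem.Str.isIn "persona" qid || PySem.Str.isIn "customer" qid || PySem.Str.isIn "audience" qid)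
  let d := if entity_type == "business" then
      d.insert "business_details" (answered_ids.any fun qid => PySem.Str.isIn "industry" qid || PySem.Str.isIn "company" qid)
    else if entity_type == "personal_brand" then
      d.insert "personal_brand_details" (answered_ids.any fun qid => PySem.Str.isIn "niche" qid || PySem.Str.isIn "expertise" qid)
    else d
  d.items

-- ===== PORT B =====
-- the (extra_key, extra_terms) pair Source B selects before the loop (None → none)
def pvExtra (entity_type : String) : Option (String × List String) :=
  if entity_type == "business" then some ("business_details", ["industry", "company"])
  else if entity_type == "personal_brand" then some ("personal_brand_details", ["niche", "expertise"])
  else none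

def assess_profile_completeness_alt (answers : List (List (String × String))) (entity_type : String) : List (String × Bool) :=
  let ek := pvExtra entity_type
  let st := answers.foldl (fun (s : Bool × Bool × Bool × Bool × Bool × Bool × Bool) qa =>
      ( s.1 || pvQid qa == "entity_type",
        s.2.1 || (PySem.Str.isIn "clarity" (pvQid qa) || PySem.Str.isIn "one-line" (pvQid qa)),
        s.2.2.1 || PySem.Str.isIn "goal" (pvQid qa),
        s.2.2.2.1 || PySem.Str.isIn "channel" (pvQid qa),
        s.2.2.2.2.1 || (PySem.Str.isIn "constraint" (pvQid qa) || PySem.Str.isIn "budget" (pvQid qa)),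
        s.2.2.2.2.2.1 || (PySem.Str.isIn "persona" (pvQid qa) || PySem.Str.isIn "customer" (pvQid qa) || PySem.Str.isIn "audience" (pvQid qa)),
        s.2.2.2.2.2.2 || (match ek with
          | some (_, ts) => ts.any (fun t => PySem.Str.isIn t (pvQid qa))
          | none => false)))
    (false, false, false, false, false, false, false)
  [("entity_type", st.1), ("clarity_statement", st.2.1), ("goals", st.2.2.1),
   ("channels", st.2.2.2.1), ("constraints", st.2.2.2.2.1), ("personas", st.2.2.2.2.2.1)]
  ++ (match ek with
      | some (k, _) => [(k, st.2.2.2.2.2.2)]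
      | none => [])

-- ===== PRECONDITION & SPEC =====
-- Pre_ excludes answers whose dict has no "question_id" key: there Python A (and B) raise KeyError.
def Pre_assess_profile_completeness (answers : List (List (String × String))) (_entity_type : String) : Prop :=
  ∀ qa ∈ answers, ((PySem.Dict.mk qa).get? "question_id").isSome
instance (answers : List (List (String × String))) (entity_type : String) : Decidable (Pre_assess_profile_completeness answers entity_type) := by unfold Pre_assess_profile_completeness; infer_instance
def pvWitness_assess_profile_completeness : (List (List (String × String))) × String :=
  ([[("question_id", "goal_1")], [("question_id", "industry_pick")]], "business")

def Spec_assess_profile_completeness (answers : List (List (String × String))) (entity_type : String) (out : List (String × Bool)) : Prop := out = assess_profile_completeness_alt answers entity_type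
instance (answers : List (List (String × String))) (entity_type : String) (out : List (String × Bool)) : Decidable (Spec_assess_profile_completeness answers entity_type out) := by unfold Spec_assess_profile_completeness; infer_instance

-- ===== CLAIM (what is proved, stated in full; the proofs are below) =====
def Claim_equal_assess_profile_completeness : Prop := ∀ (answers : List (List (String × String))) (entity_type : String), Dom_assess_profile_completeness answers entity_type → Pre_assess_profile_completeness answers entity_type → Spec_assess_profile_completeness answers entity_type (assess_profile_completeness answers entity_type)

-- ===== LEMMAS AND PROOFS =====

-- any over the deduplicated set equals any over the original list
theorem pv_any_ofList (l : List String) (p : String → Bool) :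
    (PySem.Set.ofList l).any p = l.any p := by
  rw [Bool.eq_iff_iff]
  simp [List.any_eq_true, PySem.Set.mem_ofList]

theorem pv_contains_ofList (l : List String) (x : String) :
    PySem.Set.contains (PySem.Set.ofList l) x = l.any (fun q => q == x) := by
  rw [Bool.eq_iff_iff]
  simp [PySem.Set.contains, PySem.Set.mem_ofList, List.any_eq_true]

-- the seven-flag fold over the answers computes the seven anys over the extracted ids at once
theorem pv_fold_flags (l : List (List (String × String))) (f1 f2 f3 f4 f5 f6 f7 : String → Bool)
    (s : Bool × Bool × Bool × Bool × Bool × Bool × Bool) :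
    l.foldl (fun s qa =>
      (s.1 || f1 (pvQid qa), s.2.1 || f2 (pvQid qa), s.2.2.1 || f3 (pvQid qa), s.2.2.2.1 || f4 (pvQid qa),
       s.2.2.2.2.1 || f5 (pvQid qa), s.2.2.2.2.2.1 || f6 (pvQid qa), s.2.2.2.2.2.2 || f7 (pvQid qa))) s
    = (s.1 || (l.map pvQid).any f1, s.2.1 || (l.map pvQid).any f2, s.2.2.1 || (l.map pvQid).any f3,
       s.2.2.2.1 || (l.map pvQid).any f4, s.2.2.2.2.1 || (l.map pvQid).any f5,
       s.2.2.2.2.2.1 || (l.map pvQid).any f6, s.2.2.2.2.2.2 || (l.map pvQid).any f7) := by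
  induction l generalizing s with
  | nil => simp
  | cons a t ih => simp [List.foldl_cons, ih, Bool.or_assoc]

-- ===== VERDICT (by name: the statement is the Claim_ definition above) =====
theorem assess_profile_completeness_spec : Claim_equal_assess_profile_completeness := by
  intro answers entity_type _ _
  unfold Spec_assess_profile_completeness
  simp only [assess_profile_completeness, assess_profile_completeness_alt]
  have hfold := pv_fold_flags answers
    (fun q => q == "entity_type")
    (fun q => PySem.Str.isIn "clarity" q || PySem.Str.isIn "one-line" q)
    (fun q => PySem.Str.isIn "goal" q)
    (fun q => PySem.Str.isIn "channel" q)
    (fun q => PySem.Str.isIn "constraint" q || PySem.Str.isIn "budget" q)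
    (fun q => PySem.Str.isIn "persona" q || PySem.Str.isIn "customer" q || PySem.Str.isIn "audience" q)
    (fun q => match pvExtra entity_type with
      | some (_, ts) => ts.any (fun t => PySem.Str.isIn t q)
      | none => false)
    (false, false, false, false, false, false, false)
  simp only [Bool.false_or] at hfold
  rw [hfold, pv_contains_ofList, pv_any_ofList, pv_any_ofList, pv_any_ofList, pv_any_ofList, pv_any_ofList]
  unfold pvExtra
  by_cases hb : entity_type == "business"
  · simp [hb, PySem.Dict.insert, PySem.Dict.empty, pv_any_ofList]
  · by_cases hp : entity_type == "personal_brand"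
    · simp [hb, hp, PySem.Dict.insert, PySem.Dict.empty, pv_any_ofList]
    · simp [hb, hp, PySem.Dict.insert, PySem.Dict.empty]
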